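-- pv_equiv track=rewrite | github.com/gotankersley/entropic-transform | old_entropic.py | getRepVals
-- ===== SOURCE A (Python) =====
-- def getRepVals(reps):
-- 	prev = reps[0]
-- 	repVals = [0]
-- 	repId = 0
-- 	for i in range(1, len(reps)):
-- 		r = reps[i]
-- 		if r != prev:
-- 			repId += 1
-- 			prev = r
--
-- 		repVals.append(repId)
-- 	return repVals
-- ===== SOURCE B (Python) =====
-- def getRepVals(reps):
--     # Phase 1: run-length encode the list (length of each maximal run of equal values).
--     runs = []
--     i, n = 0, len(reps)
--     while i < n:
--         j = i + 1
--         while j < n and reps[j] == reps[i]: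
--             j += 1
--         runs.append(j - i)
--         i = j
--     # Phase 2: expand each run into a block of its group id.
--     out = []
--     for gid, length in enumerate(runs):
--         out += [gid] * length
--     return out
-- ===== Notes on version B (the rewrite author's own statement) =====
-- stated objective: alternative
-- what changed: Replaces A's single stateful prev/repId pass by a run-length encoding (nested index loops producing run lengths) followed by expanding each run into a block of its group id with list repetition.
import Mathlib
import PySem

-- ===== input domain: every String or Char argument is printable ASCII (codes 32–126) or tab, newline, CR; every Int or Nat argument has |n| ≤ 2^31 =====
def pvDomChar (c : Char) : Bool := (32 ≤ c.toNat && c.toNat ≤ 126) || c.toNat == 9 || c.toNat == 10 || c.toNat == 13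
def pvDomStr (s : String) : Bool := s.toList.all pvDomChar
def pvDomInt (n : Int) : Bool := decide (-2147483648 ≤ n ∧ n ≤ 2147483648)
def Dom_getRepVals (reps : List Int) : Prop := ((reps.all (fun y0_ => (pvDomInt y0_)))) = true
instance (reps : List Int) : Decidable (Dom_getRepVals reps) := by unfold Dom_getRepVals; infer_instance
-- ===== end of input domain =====

-- B replaces A's single stateful prev/repId pass by run-length encoding the list and then
-- expanding each run into a block of its group id (objective: alternative; same asymptotic cost).

-- ===== PORT A =====
def getRepVals (reps : List Int) : List Int :=
  match reps with
  | [] => []  -- unreachable under Pre_: Python A raises IndexError (reps[0]) here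
  | r0 :: _ =>
    -- prev = reps[0]; repVals = [0]; repId = 0; for i in range(1, len(reps)): ...
    ((PySem.List.pyRange 1 (reps.length : Int) 1).foldl
      (fun (st : Int × Int × List Int) i =>
        let r := PySem.List.pyGetD reps i 0  -- in range for i ∈ range(1, len)
        if r ≠ st.1 then (r, st.2.1 + 1, st.2.2 ++ [st.2.1 + 1])
        else (st.1, st.2.1, st.2.2 ++ [st.2.1]))
      (r0, 0, [0])).2.2

-- ===== PORT B =====
-- inner while loop: `j = i + 1; while j < n and reps[j] == reps[i]: j += 1`
def bInner (reps : List Int) (v : Int) (j : Nat) : Nat :=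
  if h : j < reps.length then
    if reps[j] = v then bInner reps v (j + 1) else j
  else j
termination_by reps.length - j

-- cited by bRuns's decreasing_by: the inner loop never moves j backwards
theorem bInner_ge (reps : List Int) (v : Int) (j : Nat) : j ≤ bInner reps v j := by
  induction j using bInner.induct reps v with
  | case1 j h hv ih => rw [bInner, dif_pos h, if_pos hv]; omega
  | case2 j h hv => rw [bInner, dif_pos h, if_neg hv]
  | case3 j h => rw [bInner, dif_neg h]

-- outer while loop collecting run lengths
def bRuns (reps : List Int) (i : Nat) : List Nat :=
  if h : i < reps.length then
    let j := bInner reps reps[i] (i + 1)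
    (j - i) :: bRuns reps j
  else []
termination_by reps.length - i
decreasing_by have := bInner_ge reps reps[i] (i + 1); omega

def getRepVals_alt (reps : List Int) : List Int :=
  -- runs = run-length encoding;  for gid, length in enumerate(runs): out += [gid]*length
  let runs := bRuns reps 0
  (PySem.List.enumerate runs).foldl (fun out p => out ++ List.replicate p.2 p.1) []

-- ===== PRECONDITION & SPEC =====
-- Pre_ excludes only the empty list, on which Python A raises IndexError at reps[0].
def Pre_getRepVals (reps : List Int) : Prop := reps ≠ []
instance (reps : List Int) : Decidable (Pre_getRepVals reps) := by unfold Pre_getRepVals; infer_instance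
def pvWitness_getRepVals : List Int := [1, 1, 2]

def Spec_getRepVals (reps : List Int) (out : List Int) : Prop := out = getRepVals_alt reps
instance (reps : List Int) (out : List Int) : Decidable (Spec_getRepVals reps out) := by unfold Spec_getRepVals; infer_instance

-- ===== CLAIM (what is proved, stated in full; the proofs are below) =====
def Claim_equal_getRepVals : Prop := ∀ (reps : List Int), Dom_getRepVals reps → Pre_getRepVals reps → Spec_getRepVals reps (getRepVals reps)

-- ===== LEMMAS AND PROOFS =====

-- reference recursion: the ids A assigns to the tail, given current prev and id
def goA (prev id : Int) : List Int → List Int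
  | [] => []
  | r :: rs => if r ≠ prev then (id + 1) :: goA r (id + 1) rs else id :: goA prev id rs

-- ids of a whole (sub)list: a fresh group starts at its head
def G : List Int → Int → List Int
  | [], _ => []
  | x :: xs, id => id :: goA x id xs

-- reference expansion of run lengths into id blocks
def E : Int → List Nat → List Int
  | _, [] => []
  | id, l :: ls => List.replicate l id ++ E (id + 1) ls

theorem foldA_eq (xs : List Int) : ∀ (prev id : Int) (acc : List Int),
    ((xs.foldl
      (fun (st : Int × Int × List Int) r =>
        if r ≠ st.1 then (r, st.2.1 + 1, st.2.2 ++ [st.2.1 + 1])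
        else (st.1, st.2.1, st.2.2 ++ [st.2.1]))
      (prev, id, acc))).2.2 = acc ++ goA prev id xs := by
  induction xs with
  | nil => intro prev id acc; simp [goA]
  | cons r rs ih =>
    intro prev id acc
    rw [List.foldl_cons]
    by_cases h : r = prev
    · rw [if_neg (by simp [h]), ih, goA, if_neg (by simp [h])]
      simp
    · rw [if_pos (by simp [h]), ih, goA, if_pos (by simp [h])]
      simp

theorem foldE_eq (runs : List Nat) : ∀ (id : Int) (acc : List Int),
    (PySem.List.enumerate runs id).foldl (fun out p => out ++ List.replicate p.2 p.1) acc
      = acc ++ E id runs := by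
  induction runs with
  | nil => intro id acc; simp [PySem.List.enumerate_nil, E]
  | cons l ls ih =>
    intro id acc
    rw [PySem.List.enumerate_cons, List.foldl_cons, ih, E]
    simp

theorem bInner_stop (reps : List Int) (v : Int) (j : Nat)
    (h : bInner reps v j < reps.length) : reps.getD (bInner reps v j) 0 ≠ v := by
  induction j using bInner.induct reps v with
  | case1 j hj hv ih =>
    rw [bInner, dif_pos hj, if_pos hv] at h ⊢; exact ih h
  | case2 j hj hv =>
    rw [bInner, dif_pos hj, if_neg hv] at h ⊢
    rw [List.getD_eq_getElem reps 0 hj]; exact hv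
  | case3 j hj =>
    rw [bInner, dif_neg hj] at h; exact absurd h hj

-- expanding the inner loop: the segment [m, bInner) is one constant block of id
theorem goA_run (reps : List Int) (v : Int) (j : Nat) : ∀ (id : Int),
    goA v id (reps.drop j)
      = List.replicate (bInner reps v j - j) id ++ goA v id (reps.drop (bInner reps v j)) := by
  induction j using bInner.induct reps v with
  | case1 j h hv ih =>
    intro id
    rw [bInner, dif_pos h, if_pos hv]
    have hd : reps.drop j = reps[j] :: reps.drop (j + 1) :=
      (List.drop_eq_getElem_cons h)
    have hge := bInner_ge reps v (j + 1)
    rw [hd, goA, if_neg (by simp [hv]), ih id]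
    have : bInner reps v (j + 1) - j = (bInner reps v (j + 1) - (j + 1)) + 1 := by omega
    rw [this, List.replicate_succ]
    simp
  | case2 j h hv =>
    intro id
    rw [bInner, dif_pos h, if_neg hv]
    simp
  | case3 j h =>
    intro id
    rw [bInner, dif_neg h]
    simp

-- after the run stops, a fresh group starts (or the list ends)
theorem goA_to_G (reps : List Int) (v : Int) (m : Nat) (id : Int) :
    goA v id (reps.drop (bInner reps v m)) = G (reps.drop (bInner reps v m)) (id + 1) := by
  by_cases h : bInner reps v m < reps.length
  · have hs := bInner_stop reps v m h
    rw [List.getD_eq_getElem reps 0 h] at hs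
    rw [List.drop_eq_getElem_cons h, goA, G, if_pos (by simp [hs])]
  · rw [List.drop_eq_nil_of_le (by omega), goA, G]

theorem bRuns_E (reps : List Int) (i : Nat) : ∀ (id : Int),
    E id (bRuns reps i) = G (reps.drop i) id := by
  induction i using bRuns.induct reps with
  | case1 i h j ih =>
    intro id
    have ih' : ∀ (id' : Int), E id' (bRuns reps (bInner reps reps[i] (i + 1)))
        = G (reps.drop (bInner reps reps[i] (i + 1))) id' := ih
    rw [bRuns, dif_pos h]
    show E id ((bInner reps reps[i] (i + 1) - i) :: bRuns reps (bInner reps reps[i] (i + 1)))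
      = G (reps.drop i) id
    rw [E, ih' (id + 1), List.drop_eq_getElem_cons h, G,
      ← goA_to_G reps reps[i] (i + 1) id, goA_run reps reps[i] (i + 1) id]
    have hge := bInner_ge reps reps[i] (i + 1)
    have : bInner reps reps[i] (i + 1) - i = (bInner reps reps[i] (i + 1) - (i + 1)) + 1 := by omega
    rw [this, List.replicate_succ]
    simp
  | case2 i h =>
    intro id
    rw [bRuns, dif_neg h, List.drop_eq_nil_of_le (by omega), E, G]

-- ===== VERDICT (by name: the statement is the Claim_ definition above) =====
theorem getRepVals_spec : Claim_equal_getRepVals := by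
  intro reps _ hpre
  unfold Spec_getRepVals
  match reps, hpre with
  | r0 :: rest, _ =>
    unfold getRepVals getRepVals_alt
    dsimp only
    rw [PySem.List.foldl_pyRange_pyGetD' (r0 :: rest) 0
      (fun (st : Int × Int × List Int) r =>
        if r ≠ st.1 then (r, st.2.1 + 1, st.2.2 ++ [st.2.1 + 1])
        else (st.1, st.2.1, st.2.2 ++ [st.2.1])) (r0, 0, [0]) (by norm_num : (0:Int) ≤ 1)]
    simp only [Int.toNat_one, List.drop_succ_cons, List.drop_zero]
    rw [foldA_eq, foldE_eq, bRuns_E]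
    rfl
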